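-- pv_equiv track=rewrite | github.com/docxology/MetaInformAnt | src/metainformant/dna/sequence/kmer.py | find_microsatellites
-- ===== SOURCE A (Python) =====
-- from typing import Dict, List, Tuple
--
-- def find_microsatellites(seq: str, min_repeats: int = 3, max_unit_length: int = 6) -> List[Tuple[str, int, int, int]]:
--     """Find microsatellite (short tandem repeat) loci in a DNA sequence.
--
--     Searches for tandemly repeated motifs of length 1 to *max_unit_length*
--     that occur at least *min_repeats* consecutive times.  Homopolymers
--     (unit length 1) are included.
--
--     Args:
--         seq: DNA sequence string.
--         min_repeats: Minimum number of consecutive repeats to report.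
--             Defaults to 3.
--         max_unit_length: Maximum length of the repeat unit.  Defaults to 6.
--
--     Returns:
--         List of ``(unit, start, end, repeat_count)`` tuples sorted by start
--         position.  *end* is exclusive (Python slice convention).
--
--     Example:
--         >>> find_microsatellites("ACACACACTTTT", min_repeats=3, max_unit_length=2)
--         [('AC', 0, 8, 4), ('T', 8, 12, 4)]
--     """
--     if not seq or min_repeats <= 0 or max_unit_length <= 0:
--         return []
--
--     seq_upper = seq.upper()
--     n = len(seq_upper)
--     results: List[Tuple[str, int, int, int]] = []
--
--     # Track which positions have already been claimed by a longer/earlier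
--     # repeat so we can report non-overlapping, longest-unit-first hits.
--     covered = [False] * n
--
--     # Search from longest unit to shortest so longer motifs take priority.
--     for unit_len in range(max_unit_length, 0, -1):
--         for start in range(n - unit_len * min_repeats + 1):
--             if covered[start]:
--                 continue
--
--             unit = seq_upper[start : start + unit_len]
--             # Extend as far as the unit keeps repeating
--             pos = start + unit_len
--             repeat_count = 1
--             while pos + unit_len <= n and seq_upper[pos : pos + unit_len] == unit:
--                 repeat_count += 1
--                 pos += unit_len
--
--             if repeat_count >= min_repeats:
--                 end = start + unit_len * repeat_count
--                 # Verify this is a true repeat unit -- not a sub-multiple of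
--                 # a shorter unit that would produce the same pattern.  E.g.
--                 # "AAAAAA" with unit "AA" is really unit "A" repeated 6x.
--                 is_reducible = False
--                 for sub_len in range(1, unit_len):
--                     if unit_len % sub_len == 0:
--                         sub_unit = unit[:sub_len]
--                         if sub_unit * (unit_len // sub_len) == unit:
--                             is_reducible = True
--                             break
--
--                 if not is_reducible:
--                     results.append((unit, start, end, repeat_count))
--                     for idx in range(start, end):
--                         covered[idx] = True
--
--     results.sort(key=lambda x: x[1])
--     return results
-- ===== SOURCE B (Python) =====
-- from typing import List, Tuple
--
--
-- def _repeat_counts(s: str, n: int, u: int) -> List[int]: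
--     """rep[i] = number of consecutive copies of s[i:i+u] starting at i,
--     computed right-to-left in one pass (no re-scanning per start)."""
--     rep = [1] * n
--     for i in range(n - 2 * u, -1, -1):
--         if s[i:i + u] == s[i + u:i + 2 * u]:
--             rep[i] = rep[i + u] + 1
--     return rep
--
--
-- def _is_reducible(unit: str, u: int) -> bool:
--     return any(unit[:d] * (u // d) == unit for d in range(1, u) if u % d == 0)
--
--
-- def find_microsatellites(seq: str, min_repeats: int = 3, max_unit_length: int = 6) -> List[Tuple[str, int, int, int]]:
--     if not seq or min_repeats <= 0 or max_unit_length <= 0: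
--         return []
--
--     s = seq.upper()
--     n = len(s)
--     results: List[Tuple[str, int, int, int]] = []
--     covered = [False] * n
--
--     for u in range(max_unit_length, 0, -1):
--         limit = n - u * min_repeats + 1
--         if limit <= 0:
--             continue  # no start can host min_repeats copies of this unit length
--         rep = _repeat_counts(s, n, u)
--         start = 0
--         while start < limit:
--             if covered[start]:
--                 start += 1
--                 continue
--             rc = rep[start]
--             unit = s[start:start + u]
--             if rc >= min_repeats and not _is_reducible(unit, u):
--                 end = start + u * rc
--                 results.append((unit, start, end, rc))
--                 for j in range(start, end):
--                     covered[j] = True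
--                 start = end  # the whole locus is claimed: skip past it
--             else:
--                 start += 1
--
--     results.sort(key=lambda t: t[1])
--     return results
-- ===== Notes on version B (the rewrite author's own statement) =====
-- stated objective: alternative
-- what changed: Per unit length, B precomputes all consecutive-repeat counts with a single right-to-left DP pass and jumps past each reported locus, instead of A's per-start while-loop re-scan of the sequence (better worst case on repeat-rich sequences; comparable on random ones).
import Mathlib
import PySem

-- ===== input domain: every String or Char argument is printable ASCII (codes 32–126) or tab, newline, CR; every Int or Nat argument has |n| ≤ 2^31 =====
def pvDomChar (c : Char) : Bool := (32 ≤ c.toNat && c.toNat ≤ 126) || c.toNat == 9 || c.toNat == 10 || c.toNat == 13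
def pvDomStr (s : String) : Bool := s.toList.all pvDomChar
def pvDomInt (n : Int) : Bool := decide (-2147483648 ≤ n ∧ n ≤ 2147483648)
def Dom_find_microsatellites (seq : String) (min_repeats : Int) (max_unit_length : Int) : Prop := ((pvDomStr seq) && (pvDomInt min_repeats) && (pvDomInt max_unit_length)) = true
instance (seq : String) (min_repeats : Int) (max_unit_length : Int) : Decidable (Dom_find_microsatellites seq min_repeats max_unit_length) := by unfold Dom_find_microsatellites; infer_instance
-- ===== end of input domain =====

-- B precomputes, per unit length, all consecutive-repeat counts in one right-to-left DP pass and
-- jumps past each reported locus, instead of A's per-start while-loop re-scan (objective: alternative).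

-- ===== PORT A =====
-- helpers shared by BOTH ports: the identical source lines 'seq[a:b]', the reducibility test over
-- proper divisors, and the 'for idx in range(start, end): covered[idx] = True' loop
def fmSlice (s : List Char) (a b : Int) : List Char := PySem.List.slice s (some a) (some b)

def fmReducible (unit : List Char) (u : Int) : Bool :=
  (PySem.List.pyRange 1 u 1).any (fun d =>
    (PySem.Int.mod u d == 0) &&
    (PySem.List.pyRepeat (fmSlice unit 0 d) (PySem.Int.floordiv u d) == unit))

def fmCover (cov : List Bool) (a b : Int) : List Bool :=
  (PySem.List.pyRange a b 1).foldl (fun c idx => PySem.List.pySetD c idx true) cov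

-- A's inner while loop: 'while pos + unit_len <= n and seq_upper[pos:pos+unit_len] == unit'
-- ('0 < u' is a totality guard only: A's loops only reach u ≥ 1)
def fmAwhile (s unit : List Char) (u pos cnt : Int) : Int :=
  if h : 0 < u ∧ pos + u ≤ (s.length : Int) ∧ fmSlice s pos (pos + u) = unit then
    fmAwhile s unit u (pos + u) (cnt + 1)
  else cnt
termination_by ((s.length : Int) - pos).toNat
decreasing_by obtain ⟨h1, h2, -⟩ := h; omega

-- the body of A's 'for start in range(...)' loop
def fmAstep (s : List Char) (mr ul : Int)
    (st : List (List Char × Int × Int × Int) × List Bool) (start : Int) :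
    List (List Char × Int × Int × Int) × List Bool :=
  if PySem.List.pyGetD st.2 start false then st
  else
    let unit := fmSlice s start (start + ul)
    let rc := fmAwhile s unit ul (start + ul) 1
    if mr ≤ rc then
      if fmReducible unit ul then st
      else (st.1 ++ [(unit, start, start + ul * rc, rc)], fmCover st.2 start (start + ul * rc))
    else st

def find_microsatellites (seq : String) (min_repeats : Int) (max_unit_length : Int) :
    List (String × Int × Int × Int) :=
  if seq.toList = [] ∨ min_repeats ≤ 0 ∨ max_unit_length ≤ 0 then []
  else
    let s := PySem.Chars.upper seq.toList
    let res := ((PySem.List.pyRange max_unit_length 0 (-1)).foldl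
        (fun st ul =>
          (PySem.List.pyRange 0 ((s.length : Int) - ul * min_repeats + 1) 1).foldl
            (fmAstep s min_repeats ul) st)
        ([], List.replicate s.length false)).1
    (PySem.List.sorted res (fun x => x.2.1)).map (fun r => (String.ofList r.1, r.2))

-- ===== PORT B =====
-- one step of B's right-to-left DP: 'if s[i:i+u] == s[i+u:i+2*u]: rep[i] = rep[i+u] + 1'
def fmRepStep (s : List Char) (u : Int) (arr : List Int) (i : Int) : List Int :=
  if fmSlice s i (i + u) = fmSlice s (i + u) (i + 2 * u) then
    PySem.List.pySetD arr i (PySem.List.pyGetD arr (i + u) 1 + 1)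
  else arr

-- B's _repeat_counts: rep[i] = number of consecutive copies of s[i:i+u] starting at i
def fmRep (s : List Char) (u : Int) : List Int :=
  (PySem.List.pyRange ((s.length : Int) - 2 * u) (-1) (-1)).foldl
    (fmRepStep s u) (List.replicate s.length 1)

-- B's 'while start < limit' loop; fuel is a totality guard only (each iteration advances start
-- by at least 1, so the fuel given at the call site is never exhausted)
def fmBloop (s : List Char) (rep : List Int) (mr u limit : Int) :
    Nat → List (List Char × Int × Int × Int) × List Bool → Int →
    List (List Char × Int × Int × Int) × List Bool
  | 0, st, _ => st
  | fuel + 1, st, start =>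
    if start < limit then
      if PySem.List.pyGetD st.2 start false then
        fmBloop s rep mr u limit fuel st (start + 1)
      else
        let rc := PySem.List.pyGetD rep start 1
        let unit := fmSlice s start (start + u)
        if mr ≤ rc ∧ fmReducible unit u = false then
          fmBloop s rep mr u limit fuel
            (st.1 ++ [(unit, start, start + u * rc, rc)], fmCover st.2 start (start + u * rc))
            (start + u * rc)
        else fmBloop s rep mr u limit fuel st (start + 1)
    else st

def find_microsatellites_alt (seq : String) (min_repeats : Int) (max_unit_length : Int) :
    List (String × Int × Int × Int) :=
  if seq.toList = [] ∨ min_repeats ≤ 0 ∨ max_unit_length ≤ 0 then []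
  else
    let s := PySem.Chars.upper seq.toList
    let res := ((PySem.List.pyRange max_unit_length 0 (-1)).foldl
        (fun st u =>
          if (s.length : Int) - u * min_repeats + 1 ≤ 0 then st  -- 'if limit <= 0: continue'
          else fmBloop s (fmRep s u) min_repeats u ((s.length : Int) - u * min_repeats + 1)
            (((s.length : Int) - u * min_repeats + 1).toNat + 1) st 0)
        ([], List.replicate s.length false)).1
    (PySem.List.sorted res (fun x => x.2.1)).map (fun r => (String.ofList r.1, r.2))

-- ===== PRECONDITION & SPEC =====
def Spec_find_microsatellites (seq : String) (min_repeats : Int) (max_unit_length : Int) (out : List (String × Int × Int × Int)) : Prop := out = find_microsatellites_alt seq min_repeats max_unit_length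
instance (seq : String) (min_repeats : Int) (max_unit_length : Int) (out : List (String × Int × Int × Int)) : Decidable (Spec_find_microsatellites seq min_repeats max_unit_length out) := by unfold Spec_find_microsatellites; infer_instance

-- ===== CLAIM (what is proved, stated in full; the proofs are below) =====
def Claim_equal_find_microsatellites : Prop := ∀ (seq : String) (min_repeats : Int) (max_unit_length : Int), Dom_find_microsatellites seq min_repeats max_unit_length → Spec_find_microsatellites seq min_repeats max_unit_length (find_microsatellites seq min_repeats max_unit_length)

-- ===== LEMMAS AND PROOFS =====

-- descending ranges (step -1)
theorem pyRange_down_eq (a b : Int) :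
    PySem.List.pyRange a b (-1) =
      (List.range (if b < a then (a - b).toNat else 0)).map
        (fun k : Nat => a + (-1) * (k : Int)) := by
  simp only [PySem.List.pyRange]
  norm_num

theorem pyRange_down_nil (a b : Int) (h : a ≤ b) : PySem.List.pyRange a b (-1) = [] := by
  rw [pyRange_down_eq, if_neg (by omega)]
  rfl

theorem pyRange_down_cons (a b : Int) (h : b < a) :
    PySem.List.pyRange a b (-1) = a :: PySem.List.pyRange (a - 1) b (-1) := by
  rw [pyRange_down_eq, pyRange_down_eq, if_pos h,
    show (if b < a - 1 then (a - 1 - b).toNat else 0) = (a - 1 - b).toNat from by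
      split_ifs <;> omega,
    show (a - b).toNat = (a - 1 - b).toNat + 1 from by omega,
    List.range_succ_eq_map]
  simp only [List.map_cons, List.map_map]
  congr 1
  · norm_num
  · refine List.map_congr_left fun k _ => ?_
    show a + (-1) * ((k + 1 : Nat) : Int) = a - 1 + (-1) * (k : Int)
    push_cast
    ring

theorem mem_pyRange_down {a b x : Int} (h : x ∈ PySem.List.pyRange a b (-1)) : b < x ∧ x ≤ a := by
  rw [pyRange_down_eq] at h
  split_ifs at h with hba
  · obtain ⟨k, hk, rfl⟩ := List.mem_map.mp h
    have := List.mem_range.mp hk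
    omega
  · simp at h

theorem pyRange_one_nil (a b : Int) (h : b ≤ a) : PySem.List.pyRange a b 1 = [] := by
  refine List.eq_nil_iff_forall_not_mem.mpr fun x hx => ?_
  have := PySem.List.mem_pyRange_one.mp hx
  omega

-- pySetD / pyGetD index algebra (Int-index forms used by both ports' array updates)
theorem pyGetD_pySetD_self {α : Type} (xs : List α) (i : Int) (v d : α)
    (h0 : 0 ≤ i) (h : i < (xs.length : Int)) :
    PySem.List.pyGetD (PySem.List.pySetD xs i v) i d = v := by
  rw [PySem.List.pySetD_of_nonneg xs v h0, PySem.List.pyGetD_of_nonneg _ d h0]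
  simp [List.getD, show i.toNat < xs.length from by omega]

theorem pyGetD_pySetD_ne {α : Type} (xs : List α) (i j : Int) (v d : α)
    (h0 : 0 ≤ i) (hj : 0 ≤ j) (hne : i ≠ j) :
    PySem.List.pyGetD (PySem.List.pySetD xs i v) j d = PySem.List.pyGetD xs j d := by
  rw [PySem.List.pySetD_of_nonneg xs v h0, PySem.List.pyGetD_of_nonneg _ d hj,
    PySem.List.pyGetD_of_nonneg _ d hj]
  simp [List.getD, show ¬ i.toNat = j.toNat from by omega]

theorem pyGetD_replicate {α : Type} (n : Nat) (x : α) (j : Int) (hj : 0 ≤ j) :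
    PySem.List.pyGetD (List.replicate n x) j x = x := by
  rw [PySem.List.pyGetD_of_nonneg _ x hj]
  simp only [List.getD, List.getElem?_replicate]
  split_ifs <;> rfl

-- covered-array bookkeeping
theorem length_foldl_pySetD (l : List Int) :
    ∀ cov : List Bool, ((l.foldl (fun c idx => PySem.List.pySetD c idx true) cov)).length = cov.length := by
  induction l with
  | nil => intro cov; rfl
  | cons x xs ih => intro cov; simp [List.foldl_cons, ih, PySem.List.length_pySetD]

theorem length_fmCover (cov : List Bool) (a b : Int) : (fmCover cov a b).length = cov.length :=
  length_foldl_pySetD _ cov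

theorem fmCover_cons (cov : List Bool) (a b : Int) (h : a < b) :
    fmCover cov a b = fmCover (PySem.List.pySetD cov a true) (a + 1) b := by
  unfold fmCover
  rw [PySem.List.pyRange_one_cons h, List.foldl_cons]

theorem getD_fmCover :
    ∀ (k : Nat) (cov : List Bool) (a b j : Int), (b - a).toNat = k → 0 ≤ a → 0 ≤ j →
    PySem.List.pyGetD (fmCover cov a b) j false =
      if a ≤ j ∧ j < b ∧ j < (cov.length : Int) then true
      else PySem.List.pyGetD cov j false := by
  intro k
  induction k with
  | zero =>
    intro cov a b j hk ha hj
    unfold fmCover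
    rw [pyRange_one_nil _ _ (by omega), List.foldl_nil, if_neg (by omega)]
  | succ k ih =>
    intro cov a b j hk ha hj
    have hab : a < b := by omega
    rw [fmCover_cons cov a b hab,
      ih (PySem.List.pySetD cov a true) (a + 1) b j (by omega) (by omega) hj,
      PySem.List.length_pySetD]
    rcases eq_or_ne j a with rfl | hja
    · rw [if_neg (by omega)]
      by_cases hlt : j < (cov.length : Int)
      · rw [pyGetD_pySetD_self cov j true false hj hlt, if_pos ⟨le_rfl, hab, hlt⟩]
      · have hset : PySem.List.pySetD cov j true = cov := by
          rw [PySem.List.pySetD_of_nonneg cov true hj, List.set_eq_of_length_le (by omega)]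
        rw [hset, if_neg (by omega)]
    · rw [pyGetD_pySetD_ne cov a j true false ha hj (Ne.symm hja)]
      split_ifs with h1 h2 <;> first | rfl | omega

theorem length_fmAstep (s : List Char) (mr ul : Int)
    (st : List (List Char × Int × Int × Int) × List Bool) (start : Int) :
    (fmAstep s mr ul st start).2.length = st.2.length := by
  simp only [fmAstep]
  repeat' split_ifs
  all_goals simp [length_fmCover]

theorem length_fold_fmAstep (s : List Char) (mr ul : Int) (l : List Int) :
    ∀ st : List (List Char × Int × Int × Int) × List Bool,
    ((l.foldl (fmAstep s mr ul) st)).2.length = st.2.length := by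
  induction l with
  | nil => intro st; rfl
  | cons x xs ih => intro st; rw [List.foldl_cons, ih, length_fmAstep]

-- a stretch of already-covered positions is skipped by A's loop without changing the state
theorem fold_fmAstep_covered (s : List Char) (mr u : Int) :
    ∀ (k : Nat) (a b : Int) (st : List (List Char × Int × Int × Int) × List Bool),
    (b - a).toNat = k →
    (∀ j : Int, a ≤ j → j < b → PySem.List.pyGetD st.2 j false = true) →
    (PySem.List.pyRange a b 1).foldl (fmAstep s mr u) st = st := by
  intro k
  induction k with
  | zero =>
    intro a b st hk _
    rw [pyRange_one_nil _ _ (by omega), List.foldl_nil]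
  | succ k ih =>
    intro a b st hk hcov
    have hab : a < b := by omega
    rw [PySem.List.pyRange_one_cons hab, List.foldl_cons,
      show fmAstep s mr u st a = st from by
        unfold fmAstep; rw [if_pos (hcov a le_rfl hab)]]
    exact ih (a + 1) b st (by omega) fun j h1 h2 => hcov j (by omega) h2

-- the repeat count A computes for the window starting at i
def fmRcount (s : List Char) (u i : Int) : Int :=
  fmAwhile s (fmSlice s i (i + u)) u (i + u) 1

-- cnt is a pure accumulator of A's while loop
theorem fmAwhile_shift (s unit : List Char) (u : Int) :
    ∀ (k : Nat) (pos : Int), ((s.length : Int) - pos).toNat = k →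
    ∀ cnt d : Int, fmAwhile s unit u pos (cnt + d) = fmAwhile s unit u pos cnt + d := by
  intro k
  induction k using Nat.strong_induction_on with
  | _ k ih =>
    intro pos hk cnt d
    rw [fmAwhile]
    conv_rhs => rw [fmAwhile]
    split_ifs with h
    · obtain ⟨h1, h2, -⟩ := h
      rw [show cnt + d + 1 = (cnt + 1) + d from by ring,
        ih (((s.length : Int) - (pos + u)).toNat) (by omega) (pos + u) rfl (cnt + 1) d]
    · rfl

theorem fmRcount_rec (s : List Char) (u i : Int) (hu : 0 < u) :
    fmRcount s u i =
      if i + 2 * u ≤ (s.length : Int) ∧ fmSlice s i (i + u) = fmSlice s (i + u) (i + 2 * u) then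
        fmRcount s u (i + u) + 1
      else 1 := by
  have harg : i + u + u = i + 2 * u := by ring
  unfold fmRcount
  conv_lhs => rw [fmAwhile]
  split_ifs with hd hb hb2
  · rw [harg] at hd ⊢
    rw [hb.2, fmAwhile_shift s (fmSlice s (i + u) (i + 2 * u)) u
      (((s.length : Int) - (i + 2 * u)).toNat) (i + 2 * u) rfl 1 1]
  · rw [harg] at hd
    exact absurd ⟨hd.2.1, hd.2.2.symm⟩ hb
  · exact absurd ⟨hu, by omega, by rw [harg]; exact hb2.2.symm⟩ hd
  · rfl

-- B's DP pass fills rep with exactly A's repeat counts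
theorem fmRepStep_len (s : List Char) (u : Int) (arr : List Int) (i : Int) :
    (fmRepStep s u arr i).length = arr.length := by
  unfold fmRepStep
  split_ifs <;> simp [PySem.List.length_pySetD]

theorem fmRep_fold_correct (s : List Char) (u : Int) (hu : 0 < u) :
    ∀ (k : Nat) (m : Int) (arr : List Int), (m + 1).toNat = k →
    arr.length = s.length → m ≤ (s.length : Int) - 2 * u →
    (∀ j : Int, m < j → 0 ≤ j → PySem.List.pyGetD arr j 1 = fmRcount s u j) →
    (∀ j : Int, 0 ≤ j → j ≤ m → PySem.List.pyGetD arr j 1 = 1) →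
    ∀ j : Int, 0 ≤ j →
      PySem.List.pyGetD ((PySem.List.pyRange m (-1) (-1)).foldl (fmRepStep s u) arr) j 1 =
        fmRcount s u j := by
  intro k
  induction k with
  | zero =>
    intro m arr hk _ _ hhigh _ j hj
    rw [pyRange_down_nil m (-1) (by omega), List.foldl_nil]
    exact hhigh j (by omega) hj
  | succ k ih =>
    intro m arr hk hlen hm hhigh hlow j hj
    have hm0 : 0 ≤ m := by omega
    rw [pyRange_down_cons m (-1) (by omega), List.foldl_cons]
    have hstep : PySem.List.pyGetD (fmRepStep s u arr m) m 1 = fmRcount s u m := by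
      unfold fmRepStep
      split_ifs with hc
      · rw [pyGetD_pySetD_self _ _ _ _ hm0 (by omega),
          hhigh (m + u) (by omega) (by omega),
          fmRcount_rec s u m hu, if_pos ⟨by omega, hc⟩]
      · rw [hlow m hm0 le_rfl, fmRcount_rec s u m hu, if_neg (by rintro ⟨-, h⟩; exact hc h)]
    have hne : ∀ j : Int, 0 ≤ j → j ≠ m →
        PySem.List.pyGetD (fmRepStep s u arr m) j 1 = PySem.List.pyGetD arr j 1 := by
      intro j hj0 hjm
      unfold fmRepStep
      split_ifs with hc
      · exact pyGetD_pySetD_ne _ _ _ _ _ hm0 hj0 (fun h => hjm h.symm)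
      · rfl
    refine ih (m - 1) (fmRepStep s u arr m) (by omega)
      (by rw [fmRepStep_len]; exact hlen) (by omega) ?_ ?_ j hj
    · intro j hj1 hj0
      rcases eq_or_ne j m with rfl | hjm
      · exact hstep
      · rw [hne j hj0 hjm]
        exact hhigh j (by omega) hj0
    · intro j hj0 hjm
      rw [hne j hj0 (by omega)]
      exact hlow j hj0 (by omega)

theorem fmRep_getD (s : List Char) (u : Int) (hu : 0 < u) (i : Int) (hi : 0 ≤ i) :
    PySem.List.pyGetD (fmRep s u) i 1 = fmRcount s u i := by
  unfold fmRep
  refine fmRep_fold_correct s u hu (((s.length : Int) - 2 * u) + 1).toNat _ _ rfl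
    (by simp) le_rfl ?_ ?_ i hi
  · intro j hj1 hj0
    rw [pyGetD_replicate _ _ _ hj0, fmRcount_rec s u j hu, if_neg (by rintro ⟨h, -⟩; omega)]
  · intro j hj0 _
    exact pyGetD_replicate _ _ _ hj0

-- B's while-with-jump equals A's for-loop over all starts
theorem fmBloop_eq_fold (s : List Char) (rep : List Int) (mr u limit : Int)
    (hu : 0 < u) (hmr : 0 < mr) (hlim : limit ≤ (s.length : Int))
    (hrep : ∀ i : Int, 0 ≤ i → PySem.List.pyGetD rep i 1 = fmRcount s u i) :
    ∀ (fuel : Nat) (start : Int) (st : List (List Char × Int × Int × Int) × List Bool),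
    0 ≤ start → (limit - start).toNat < fuel → st.2.length = s.length →
    fmBloop s rep mr u limit fuel st start =
      (PySem.List.pyRange start limit 1).foldl (fmAstep s mr u) st := by
  intro fuel
  induction fuel with
  | zero => intro start st _ hf _; omega
  | succ fuel ih =>
    intro start st h0 hf hlen
    simp only [fmBloop]
    by_cases hsl : start < limit
    · rw [if_pos hsl, PySem.List.pyRange_one_cons hsl, List.foldl_cons]
      by_cases hcov : PySem.List.pyGetD st.2 start false
      · rw [if_pos hcov,
          show fmAstep s mr u st start = st from by unfold fmAstep; rw [if_pos hcov]]
        exact ih (start + 1) st (by omega) (by omega) hlen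
      · rw [if_neg hcov]
        rw [hrep start h0]
        set rc := fmRcount s u start with hrc
        have hrc' : fmAwhile s (fmSlice s start (start + u)) u (start + u) 1 = rc := hrc.symm
        by_cases hacc : mr ≤ rc ∧ fmReducible (fmSlice s start (start + u)) u = false
        · rw [if_pos hacc]
          have hrc1 : 1 ≤ rc := le_trans hmr hacc.1
          have hadv : start + 1 ≤ start + u * rc := by nlinarith
          have hAst : fmAstep s mr u st start =
              (st.1 ++ [(fmSlice s start (start + u), start, start + u * rc, rc)],
               fmCover st.2 start (start + u * rc)) := by
            simp only [fmAstep]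
            rw [if_neg hcov, hrc', if_pos hacc.1,
              if_neg (by rw [hacc.2]; exact Bool.false_ne_true)]
          rw [hAst]
          set st' := (st.1 ++ [(fmSlice s start (start + u), start, start + u * rc, rc)],
            fmCover st.2 start (start + u * rc)) with hst'
          have hlen' : st'.2.length = s.length := by
            rw [hst', length_fmCover]; exact hlen
          rw [ih (start + u * rc) st' (by omega) (by omega) hlen']
          have hcovd : ∀ j : Int, start + 1 ≤ j → j < limit → j < start + u * rc →
              PySem.List.pyGetD st'.2 j false = true := by
            intro j h1 h2 h3
            rw [hst']
            rw [getD_fmCover ((start + u * rc - start).toNat) st.2 start (start + u * rc) j rfl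
              h0 (by omega), if_pos ⟨by omega, h3, by omega⟩]
          by_cases hel : start + u * rc < limit
          · rw [PySem.List.pyRange_one_append (start + 1) (start + u * rc) limit (by omega)
              (by omega), List.foldl_append,
              fold_fmAstep_covered s mr u ((start + u * rc - (start + 1)).toNat) (start + 1)
                (start + u * rc) st' rfl (fun j ha hb => hcovd j ha (by omega) hb)]
          · rw [pyRange_one_nil (start + u * rc) limit (by omega), List.foldl_nil,
              fold_fmAstep_covered s mr u ((limit - (start + 1)).toNat) (start + 1) limit st'
                rfl (fun j ha hb => hcovd j ha hb (by omega))]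
        · rw [if_neg hacc]
          rw [show fmAstep s mr u st start = st from by
            simp only [fmAstep]
            rw [if_neg hcov, hrc']
            by_cases hm : mr ≤ rc
            · rw [if_pos hm, if_pos (by
                rcases Bool.eq_false_or_eq_true (fmReducible (fmSlice s start (start + u)) u)
                  with hred | hred
                · exact hred
                · exact absurd ⟨hm, hred⟩ hacc)]
            · rw [if_neg hm]]
          exact ih (start + 1) st (by omega) (by omega) hlen
    · rw [if_neg hsl, pyRange_one_nil start limit (by omega), List.foldl_nil]

-- the outer loop over unit lengths, step for step
theorem outer_eq (s : List Char) (mr : Int) (hmr : 0 < mr) :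
    ∀ (uls : List Int), (∀ x ∈ uls, 0 < x) →
    ∀ st : List (List Char × Int × Int × Int) × List Bool, st.2.length = s.length →
    uls.foldl (fun st ul =>
        (PySem.List.pyRange 0 ((s.length : Int) - ul * mr + 1) 1).foldl
          (fmAstep s mr ul) st) st =
    uls.foldl (fun st u =>
        if (s.length : Int) - u * mr + 1 ≤ 0 then st
        else fmBloop s (fmRep s u) mr u ((s.length : Int) - u * mr + 1)
          (((s.length : Int) - u * mr + 1).toNat + 1) st 0) st := by
  intro uls
  induction uls with
  | nil => intro _ st _; rfl
  | cons u rest ih =>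
    intro hpos st hlen
    have hu : 0 < u := hpos u List.mem_cons_self
    have humr : 1 ≤ u * mr := by nlinarith
    rw [List.foldl_cons, List.foldl_cons]
    have hstep : (PySem.List.pyRange 0 ((s.length : Int) - u * mr + 1) 1).foldl
        (fmAstep s mr u) st =
        (if (s.length : Int) - u * mr + 1 ≤ 0 then st
         else fmBloop s (fmRep s u) mr u ((s.length : Int) - u * mr + 1)
           (((s.length : Int) - u * mr + 1).toNat + 1) st 0) := by
      split_ifs with hl
      · rw [pyRange_one_nil 0 _ (by omega), List.foldl_nil]
      · rw [fmBloop_eq_fold s (fmRep s u) mr u ((s.length : Int) - u * mr + 1) hu hmr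
          (by omega) (fun i hi => fmRep_getD s u hu i hi)
          (((s.length : Int) - u * mr + 1).toNat + 1) 0 st le_rfl (by omega) hlen]
    rw [← hstep]
    exact ih (fun x hx => hpos x (List.mem_cons_of_mem u hx))
      ((PySem.List.pyRange 0 ((s.length : Int) - u * mr + 1) 1).foldl (fmAstep s mr u) st)
      (by rw [length_fold_fmAstep]; exact hlen)

-- ===== VERDICT (by name: the statement is the Claim_ definition above) =====
theorem find_microsatellites_spec : Claim_equal_find_microsatellites := by
  intro seq mr mul _
  unfold Spec_find_microsatellites find_microsatellites find_microsatellites_alt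
  split_ifs with h
  · rfl
  · rw [not_or, not_or] at h
    obtain ⟨-, hmr, hmul⟩ := h
    have hout := outer_eq (PySem.Chars.upper seq.toList) mr (by omega)
      (PySem.List.pyRange mul 0 (-1))
      (fun x hx => (mem_pyRange_down hx).1)
      ([], List.replicate (PySem.Chars.upper seq.toList).length false)
      (by simp)
    simp only [hout]
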